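-- pv_equiv track=rewrite | github.com/tsani/coding-cat-public | first-a-then-b/mutation_4.py | first_a_then_b
-- ===== SOURCE A (Python) =====
-- def first_a_then_b(list_ab: list) -> list:
--     '''
--     elif replaced by else
--     '''
--     A = []
--     B = []
--     for char in range(len(list_ab)):
--         if list_ab[char] == "a":
--             A.append(list_ab[char])
--         else:
--             B.append(list_ab[char])
--     return A + B
-- ===== SOURCE B (Python) =====
-- def first_a_then_b(list_ab: list) -> list:
--     return sorted(list_ab, key=lambda x: x != "a")
-- ===== Notes on version B (the rewrite author's own statement) =====
-- stated objective: idiomatic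
-- what changed: Replaced the index-loop with two accumulator buckets by a single stable sort on the boolean key x != "a", which puts all "a" elements first while preserving relative order.
import Mathlib
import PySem

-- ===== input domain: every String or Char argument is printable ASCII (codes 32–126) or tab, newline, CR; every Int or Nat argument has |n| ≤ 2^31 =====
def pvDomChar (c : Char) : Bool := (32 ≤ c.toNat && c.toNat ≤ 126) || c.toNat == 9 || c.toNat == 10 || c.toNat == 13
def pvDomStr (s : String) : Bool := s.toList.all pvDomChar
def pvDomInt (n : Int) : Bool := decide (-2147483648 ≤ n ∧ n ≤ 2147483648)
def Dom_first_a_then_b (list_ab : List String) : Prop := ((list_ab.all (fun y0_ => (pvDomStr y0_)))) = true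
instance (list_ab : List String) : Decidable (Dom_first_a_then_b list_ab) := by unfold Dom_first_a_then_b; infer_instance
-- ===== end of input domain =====

-- B replaces A's two-bucket index loop with one stable sort on the boolean key x != "a" (idiomatic; same result, not faster).


-- ===== PORT A =====
-- for char in range(len(list_ab)): append list_ab[char] to A or B; return A + B
def first_a_then_b (list_ab : List String) : List String :=
  let st : List String × List String :=
    (PySem.List.pyRange 0 (PySem.List.len list_ab)).foldl
      (fun acc char =>
        if PySem.List.pyGetD list_ab char "" = "a" then
          (acc.1 ++ [PySem.List.pyGetD list_ab char ""], acc.2)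
        else
          (acc.1, acc.2 ++ [PySem.List.pyGetD list_ab char ""]))
      ([], [])
  st.1 ++ st.2

-- ===== PORT B =====
-- sorted(list_ab, key=lambda x: x != "a")  (Python bools sort as 0/1)
def first_a_then_b_alt (list_ab : List String) : List String :=
  PySem.List.sorted list_ab (fun x => if x ≠ "a" then (1 : Nat) else 0)

-- ===== PRECONDITION & SPEC =====
def Spec_first_a_then_b (list_ab : List String) (out : List String) : Prop := out = first_a_then_b_alt list_ab
instance (list_ab : List String) (out : List String) : Decidable (Spec_first_a_then_b list_ab out) := by unfold Spec_first_a_then_b; infer_instance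

-- ===== CLAIM (what is proved, stated in full; the proofs are below) =====
def Claim_equal_first_a_then_b : Prop := ∀ (list_ab : List String), Dom_first_a_then_b list_ab → Spec_first_a_then_b list_ab (first_a_then_b list_ab)

-- ===== LEMMAS AND PROOFS =====

-- the boolean key used by B
def pvKey (x : String) : Nat := if x ≠ "a" then 1 else 0

lemma pvKey_le_one (x : String) : pvKey x ≤ 1 := by
  unfold pvKey; split <;> omega

lemma insertBy_append (before : String → String → Bool) (x : String)
    (A B : List String) (hA : ∀ y ∈ A, before x y = false)
    (hB : ∀ b t, B = b :: t → before x b = true) :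
    PySem.List.insertBy before x (A ++ B) = A ++ x :: B := by
  induction A with
  | nil =>
    cases B with
    | nil => simp [PySem.List.insertBy]
    | cons b t => simp [PySem.List.insertBy, hB b t rfl]
  | cons a A ih =>
    have ha : before x a = false := hA a (by simp)
    simp only [List.cons_append, PySem.List.insertBy, ha, Bool.false_eq_true,
      if_false]
    exact congrArg (a :: ·) (ih (fun y hy => hA y (by simp [hy])))

lemma foldl_ins (xs : List String) (A B : List String)
    (hA : ∀ y ∈ A, y = "a") (hB : ∀ y ∈ B, y ≠ "a") :
    xs.foldl (fun acc x => PySem.List.insertBy (fun a b => decide (pvKey a < pvKey b)) x acc) (A ++ B)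
      = (A ++ xs.filter (fun x => decide (x = "a"))) ++ (B ++ xs.filter (fun x => decide (x ≠ "a"))) := by
  induction xs generalizing A B with
  | nil => simp
  | cons x xs ih =>
    by_cases hx : x = "a"
    · subst hx
      have h1 : PySem.List.insertBy (fun a b => decide (pvKey a < pvKey b)) "a" (A ++ B)
          = (A ++ ["a"]) ++ B := by
        rw [insertBy_append]
        · simp
        · intro y hy; have := hA y hy; simp [this, pvKey]
        · intro b t hbt; subst hbt
          have := hB b (by simp); simp [pvKey, this]
      simp only [List.foldl_cons, h1]
      have hA' : ∀ y ∈ A ++ ["a"], y = "a" := by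
        intro y hy
        rcases List.mem_append.1 hy with h | h
        · exact hA y h
        · simpa using h
      rw [ih (A ++ ["a"]) B hA' hB]
      simp
    · have h1 : PySem.List.insertBy (fun a b => decide (pvKey a < pvKey b)) x (A ++ B)
          = A ++ (B ++ [x]) := by
        rw [PySem.List.insertBy_of_forall_not_before]
        · simp
        · intro y hy
          have : pvKey x = 1 := by simp [pvKey, hx]
          have := pvKey_le_one y
          simp; omega
      simp only [List.foldl_cons, h1]
      have hB' : ∀ y ∈ B ++ [x], y ≠ "a" := by
        intro y hy
        rcases List.mem_append.1 hy with h | h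
        · exact hB y h
        · simp at h; simpa [h] using hx
      rw [ih A (B ++ [x]) hA hB']
      simp [hx]

lemma alt_eq_filters (xs : List String) :
    first_a_then_b_alt xs
      = xs.filter (fun x => decide (x = "a")) ++ xs.filter (fun x => decide (x ≠ "a")) := by
  unfold first_a_then_b_alt
  rw [PySem.List.sorted_eq_foldl_insertBy]
  have := foldl_ins xs [] [] (by simp) (by simp)
  simpa [pvKey] using this

lemma foldA (xs : List String) (A B : List String) :
    xs.foldl (fun (acc : List String × List String) x =>
        if x = "a" then (acc.1 ++ [x], acc.2) else (acc.1, acc.2 ++ [x])) (A, B)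
      = (A ++ xs.filter (fun x => decide (x = "a")), B ++ xs.filter (fun x => decide (x ≠ "a"))) := by
  induction xs generalizing A B with
  | nil => simp
  | cons x xs ih =>
    by_cases hx : x = "a"
    · subst hx; simp [ih]
    · simp [hx, ih]

-- ===== VERDICT (by name: the statement is the Claim_ definition above) =====
theorem first_a_then_b_spec : Claim_equal_first_a_then_b := by
  intro xs _
  show first_a_then_b xs = first_a_then_b_alt xs
  unfold first_a_then_b
  rw [PySem.List.foldl_pyRange_zero_pyGetD xs ""
    (fun (acc : List String × List String) x =>
      if x = "a" then (acc.1 ++ [x], acc.2) else (acc.1, acc.2 ++ [x]))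
    ([], [])]
  rw [foldA, alt_eq_filters]
  simp
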